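-- pv_equiv track=rewrite | github.com/Julius2342/pyvlx | pyvlx/string_helper.py | statusflags_from_bytes
-- ===== SOURCE A (Python) =====
-- def statusflags_from_bytes(payload):
--     """Extracts Status Flags form binary Coded list
--     Least significant bit in first byte holds information
--     of the actuator node with index 0"""
--     #XXX: bitbanging to be improved
--
--     flaglist = []
--     for index, item in enumerate(payload):
--         if item & 0x01:
--             flaglist.append(index * 8)
--         if item & 0x02:
--             flaglist.append(index * 8 + 1)
--         if item & 0x04:
--             flaglist.append(index * 8 + 2)
--         if item & 0x08:
--             flaglist.append(index * 8 + 3)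
--         if item & 0x10:
--             flaglist.append(index * 8 + 4)
--         if item & 0x20:
--             flaglist.append(index * 8 + 5)
--         if item & 0x40:
--             flaglist.append(index * 8 + 6)
--         if item & 0x80:
--             flaglist.append(index * 8 + 7)
--     return flaglist
-- ===== SOURCE B (Python) =====
-- # Table-driven: precomputed per-byte set-bit positions, one lookup per byte.
-- TABLE = [[p for p in range(8) if (v >> p) & 1] for v in range(256)]
--
--
-- def statusflags_from_bytes(payload):
--     return [index * 8 + p
--             for index, item in enumerate(payload)
--             for p in TABLE[item & 0xFF]]
-- ===== Notes on version B (the rewrite author's own statement) =====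
-- stated objective: alternative
-- what changed: Replaces A's eight hard-coded per-byte bit probes with a precomputed 256-entry lookup table of ascending set-bit positions, emitting index*8+p for each tabulated position of item & 0xFF in a single flat comprehension.
import Mathlib
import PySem

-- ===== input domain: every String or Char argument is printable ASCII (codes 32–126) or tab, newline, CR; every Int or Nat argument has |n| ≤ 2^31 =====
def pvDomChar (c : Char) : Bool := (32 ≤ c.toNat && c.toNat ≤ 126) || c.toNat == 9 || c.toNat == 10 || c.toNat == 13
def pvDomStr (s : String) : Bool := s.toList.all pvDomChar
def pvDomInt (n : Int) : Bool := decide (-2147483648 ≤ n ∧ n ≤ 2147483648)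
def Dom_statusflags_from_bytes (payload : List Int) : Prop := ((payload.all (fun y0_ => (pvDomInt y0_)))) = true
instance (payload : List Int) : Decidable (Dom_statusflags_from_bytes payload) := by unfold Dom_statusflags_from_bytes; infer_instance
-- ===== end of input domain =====

-- B replaces A's eight per-byte bit probes by a precomputed 256-entry table of
-- set-bit positions and one table lookup per byte (objective: alternative).

-- ===== PORT A =====
def statusflags_from_bytes (payload : List Int) : List Int :=
  (PySem.List.enumerate payload).foldl (fun flaglist x =>
    let index := x.1
    let item := x.2
    let flaglist := if PySem.Int.band item 0x01 ≠ 0 then flaglist ++ [index * 8] else flaglist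
    let flaglist := if PySem.Int.band item 0x02 ≠ 0 then flaglist ++ [index * 8 + 1] else flaglist
    let flaglist := if PySem.Int.band item 0x04 ≠ 0 then flaglist ++ [index * 8 + 2] else flaglist
    let flaglist := if PySem.Int.band item 0x08 ≠ 0 then flaglist ++ [index * 8 + 3] else flaglist
    let flaglist := if PySem.Int.band item 0x10 ≠ 0 then flaglist ++ [index * 8 + 4] else flaglist
    let flaglist := if PySem.Int.band item 0x20 ≠ 0 then flaglist ++ [index * 8 + 5] else flaglist
    let flaglist := if PySem.Int.band item 0x40 ≠ 0 then flaglist ++ [index * 8 + 6] else flaglist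
    let flaglist := if PySem.Int.band item 0x80 ≠ 0 then flaglist ++ [index * 8 + 7] else flaglist
    flaglist) []

-- ===== PORT B =====
-- TABLE = [[p for p in range(8) if (v >> p) & 1] for v in range(256)]
def pvTable : List (List Int) :=
  (PySem.List.pyRange 0 256).map (fun v : Int =>
    (PySem.List.pyRange 0 8).filter (fun p => PySem.Int.band (v >>> p.toNat) 1 != 0))

-- TABLE[item & 0xFF]: the index is always in [0,256), so Python never raises
-- here; pyGetD's default [] is unreachable.
def statusflags_from_bytes_alt (payload : List Int) : List Int :=
  (PySem.List.enumerate payload).flatMap (fun x =>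
    (PySem.List.pyGetD pvTable (PySem.Int.band x.2 0xFF) []).map (fun p => x.1 * 8 + p))

-- ===== PRECONDITION & SPEC =====
def Spec_statusflags_from_bytes (payload : List Int) (out : List Int) : Prop := out = statusflags_from_bytes_alt payload
instance (payload : List Int) (out : List Int) : Decidable (Spec_statusflags_from_bytes payload out) := by unfold Spec_statusflags_from_bytes; infer_instance

-- ===== CLAIM (what is proved, stated in full; the proofs are below) =====
def Claim_equal_statusflags_from_bytes : Prop := ∀ (payload : List Int), Dom_statusflags_from_bytes payload → Spec_statusflags_from_bytes payload (statusflags_from_bytes payload)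

-- ===== LEMMAS AND PROOFS =====

-- A's per-byte contribution, as a list.
def pvRowA (x : Int × Int) : List Int :=
  (if PySem.Int.band x.2 0x01 ≠ 0 then [x.1 * 8] else []) ++
  (if PySem.Int.band x.2 0x02 ≠ 0 then [x.1 * 8 + 1] else []) ++
  (if PySem.Int.band x.2 0x04 ≠ 0 then [x.1 * 8 + 2] else []) ++
  (if PySem.Int.band x.2 0x08 ≠ 0 then [x.1 * 8 + 3] else []) ++
  (if PySem.Int.band x.2 0x10 ≠ 0 then [x.1 * 8 + 4] else []) ++
  (if PySem.Int.band x.2 0x20 ≠ 0 then [x.1 * 8 + 5] else []) ++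
  (if PySem.Int.band x.2 0x40 ≠ 0 then [x.1 * 8 + 6] else []) ++
  (if PySem.Int.band x.2 0x80 ≠ 0 then [x.1 * 8 + 7] else [])

-- the set-bit positions of w's low byte, as A probes them
def pvBits (w : Int) : List Int :=
  (if PySem.Int.band w 0x01 ≠ 0 then [0] else []) ++
  (if PySem.Int.band w 0x02 ≠ 0 then [1] else []) ++
  (if PySem.Int.band w 0x04 ≠ 0 then [2] else []) ++
  (if PySem.Int.band w 0x08 ≠ 0 then [3] else []) ++
  (if PySem.Int.band w 0x10 ≠ 0 then [4] else []) ++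
  (if PySem.Int.band w 0x20 ≠ 0 then [5] else []) ++
  (if PySem.Int.band w 0x40 ≠ 0 then [6] else []) ++
  (if PySem.Int.band w 0x80 ≠ 0 then [7] else [])

-- A's loop body appends exactly pvRowA x.
set_option maxHeartbeats 4000000 in
lemma pvBody_eq : (fun (flaglist : List Int) (x : Int × Int) =>
      let index := x.1
      let item := x.2
      let flaglist := if PySem.Int.band item 0x01 ≠ 0 then flaglist ++ [index * 8] else flaglist
      let flaglist := if PySem.Int.band item 0x02 ≠ 0 then flaglist ++ [index * 8 + 1] else flaglist
      let flaglist := if PySem.Int.band item 0x04 ≠ 0 then flaglist ++ [index * 8 + 2] else flaglist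
      let flaglist := if PySem.Int.band item 0x08 ≠ 0 then flaglist ++ [index * 8 + 3] else flaglist
      let flaglist := if PySem.Int.band item 0x10 ≠ 0 then flaglist ++ [index * 8 + 4] else flaglist
      let flaglist := if PySem.Int.band item 0x20 ≠ 0 then flaglist ++ [index * 8 + 5] else flaglist
      let flaglist := if PySem.Int.band item 0x40 ≠ 0 then flaglist ++ [index * 8 + 6] else flaglist
      let flaglist := if PySem.Int.band item 0x80 ≠ 0 then flaglist ++ [index * 8 + 7] else flaglist
      flaglist) = fun flaglist x => flaglist ++ pvRowA x := by
  funext acc x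
  by_cases h1 : PySem.Int.band x.2 0x01 ≠ 0 <;>
  by_cases h2 : PySem.Int.band x.2 0x02 ≠ 0 <;>
  by_cases h3 : PySem.Int.band x.2 0x04 ≠ 0 <;>
  by_cases h4 : PySem.Int.band x.2 0x08 ≠ 0 <;>
  by_cases h5 : PySem.Int.band x.2 0x10 ≠ 0 <;>
  by_cases h6 : PySem.Int.band x.2 0x20 ≠ 0 <;>
  by_cases h7 : PySem.Int.band x.2 0x40 ≠ 0 <;>
  by_cases h8 : PySem.Int.band x.2 0x80 ≠ 0 <;>
  simp [pvRowA, h1, h2, h3, h4, h5, h6, h7, h8, List.append_assoc]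

lemma statusflags_eq_flatMap (payload : List Int) :
    statusflags_from_bytes payload = (PySem.List.enumerate payload).flatMap pvRowA := by
  unfold statusflags_from_bytes
  rw [pvBody_eq, PySem.List.foldl_append_eq_flatMap]
  simp

-- A's row is its bits list shifted by index*8.
set_option maxHeartbeats 4000000 in
lemma pvRowA_map (i item : Int) :
    pvRowA (i, item) = (pvBits item).map (fun p => i * 8 + p) := by
  by_cases h1 : PySem.Int.band item 0x01 ≠ 0 <;>
  by_cases h2 : PySem.Int.band item 0x02 ≠ 0 <;>
  by_cases h3 : PySem.Int.band item 0x04 ≠ 0 <;>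
  by_cases h4 : PySem.Int.band item 0x08 ≠ 0 <;>
  by_cases h5 : PySem.Int.band item 0x10 ≠ 0 <;>
  by_cases h6 : PySem.Int.band item 0x20 ≠ 0 <;>
  by_cases h7 : PySem.Int.band item 0x40 ≠ 0 <;>
  by_cases h8 : PySem.Int.band item 0x80 ≠ 0 <;>
  simp [pvRowA, pvBits, h1, h2, h3, h4, h5, h6, h7, h8]

-- k < 8 → the k-th bit of n only depends on n mod 256 (Nat level).
lemma pvNatKey (n k : Nat) (hk : k < 8) : n &&& 2 ^ k = (n % 256) &&& 2 ^ k := by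
  rw [show (256 : Nat) = 2 ^ 8 from rfl, ← Nat.and_two_pow_sub_one_eq_mod, Nat.and_assoc]
  have h : (2 ^ 8 - 1) &&& 2 ^ k = 2 ^ k := by interval_cases k <;> rfl
  rw [h]

-- finite check used in the negative branch of pvBandPow
set_option maxRecDepth 40000 in
set_option maxHeartbeats 1600000 in
lemma pvNatKey2 : ∀ r : Fin 256, ∀ k : Fin 8,
    2 ^ (k : Nat) - (2 ^ (k : Nat) &&& (r : Nat)) = (255 - (r : Nat)) &&& 2 ^ (k : Nat) := by
  decide

lemma pvToNatPow (k : Nat) : ((2 ^ k : Int)).toNat = 2 ^ k := by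
  rw [show ((2:Int) ^ k) = ((2 ^ k : Nat) : Int) from by push_cast; ring, Int.toNat_natCast]

-- item & (1 << k) only depends on item mod 256 (Python semantics, any sign).
lemma pvBandPow (a : Int) (k : Nat) (hk : k < 8) :
    PySem.Int.band a (2 ^ k) = PySem.Int.band (PySem.Int.mod a 256) (2 ^ k) := by
  rw [PySem.Int.mod_eq_emod_of_pos (by norm_num)]
  by_cases ha : 0 ≤ a
  · have h1 : (a % 256).toNat = a.toNat % 256 := by omega
    have h2 : 0 ≤ a % 256 := by omega
    simp only [PySem.Int.band, if_pos ha, if_pos h2, if_pos (show (0:Int) ≤ 2 ^ k by positivity)]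
    rw [h1, pvToNatPow, ← pvNatKey _ _ hk]
  · have ha' : a < 0 := by omega
    set m := (-a - 1).toNat with hm
    have h1 : (a % 256).toNat = 255 - m % 256 := by omega
    have h2 : 0 ≤ a % 256 := by omega
    simp only [PySem.Int.band, if_neg ha, if_pos h2, if_pos (show (0:Int) ≤ 2 ^ k by positivity)]
    rw [h1, pvToNatPow, ← hm]
    congr 1
    have h3 : 2 ^ k &&& m = 2 ^ k &&& (m % 256) := by
      rw [Nat.and_comm, pvNatKey m k hk, Nat.and_comm]
    rw [h3]
    exact pvNatKey2 ⟨m % 256, Nat.mod_lt _ (by norm_num)⟩ ⟨k, hk⟩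

lemma pvBand1 (w : Int) : PySem.Int.band w 1 = PySem.Int.band (PySem.Int.mod w 256) 1 := by
  have h := pvBandPow w 0 (by norm_num); norm_num at h; rw [PySem.Int.mod_eq_emod_of_pos (by norm_num)]; exact h
lemma pvBand2 (w : Int) : PySem.Int.band w 2 = PySem.Int.band (PySem.Int.mod w 256) 2 := by
  have h := pvBandPow w 1 (by norm_num); norm_num at h; rw [PySem.Int.mod_eq_emod_of_pos (by norm_num)]; exact h
lemma pvBand4 (w : Int) : PySem.Int.band w 4 = PySem.Int.band (PySem.Int.mod w 256) 4 := by
  have h := pvBandPow w 2 (by norm_num); norm_num at h; rw [PySem.Int.mod_eq_emod_of_pos (by norm_num)]; exact h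
lemma pvBand8 (w : Int) : PySem.Int.band w 8 = PySem.Int.band (PySem.Int.mod w 256) 8 := by
  have h := pvBandPow w 3 (by norm_num); norm_num at h; rw [PySem.Int.mod_eq_emod_of_pos (by norm_num)]; exact h
lemma pvBand16 (w : Int) : PySem.Int.band w 16 = PySem.Int.band (PySem.Int.mod w 256) 16 := by
  have h := pvBandPow w 4 (by norm_num); norm_num at h; rw [PySem.Int.mod_eq_emod_of_pos (by norm_num)]; exact h
lemma pvBand32 (w : Int) : PySem.Int.band w 32 = PySem.Int.band (PySem.Int.mod w 256) 32 := by
  have h := pvBandPow w 5 (by norm_num); norm_num at h; rw [PySem.Int.mod_eq_emod_of_pos (by norm_num)]; exact h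
lemma pvBand64 (w : Int) : PySem.Int.band w 64 = PySem.Int.band (PySem.Int.mod w 256) 64 := by
  have h := pvBandPow w 6 (by norm_num); norm_num at h; rw [PySem.Int.mod_eq_emod_of_pos (by norm_num)]; exact h
lemma pvBand128 (w : Int) : PySem.Int.band w 128 = PySem.Int.band (PySem.Int.mod w 256) 128 := by
  have h := pvBandPow w 7 (by norm_num); norm_num at h; rw [PySem.Int.mod_eq_emod_of_pos (by norm_num)]; exact h

-- A's probes only look at the low byte.
lemma pvBits_mod (w : Int) : pvBits w = pvBits (PySem.Int.mod w 256) := by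
  unfold pvBits
  rw [pvBand1 w, pvBand2 w, pvBand4 w, pvBand8 w, pvBand16 w, pvBand32 w,
      pvBand64 w, pvBand128 w]

-- item & 0xFF is item mod 256 (Python semantics, any sign).
lemma pvBandMask (a : Int) : PySem.Int.band a 255 = PySem.Int.mod a 256 := by
  rw [PySem.Int.mod_eq_emod_of_pos (by norm_num)]
  by_cases ha : 0 ≤ a
  · simp only [PySem.Int.band, if_pos ha, if_pos (show (0:Int) ≤ 255 by norm_num)]
    rw [show ((255:Int)).toNat = 2 ^ 8 - 1 from rfl, Nat.and_two_pow_sub_one_eq_mod]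
    omega
  · simp only [PySem.Int.band, if_neg ha, if_pos (show (0:Int) ≤ 255 by norm_num)]
    rw [show ((255:Int)).toNat = 2 ^ 8 - 1 from rfl,
        Nat.and_comm ((2:Nat) ^ 8 - 1), Nat.and_two_pow_sub_one_eq_mod]
    omega

-- For byte values, B's table row is A's bits list (finite check).
set_option maxRecDepth 40000 in
set_option maxHeartbeats 1600000 in
lemma pvFinRow : ∀ n : Fin 256,
    (PySem.List.pyRange 0 8).filter
      (fun p => PySem.Int.band ((((n : Nat) : Int)) >>> p.toNat) 1 != 0) =
      pvBits ((n : Nat) : Int) := by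
  decide

lemma pvRow_eq (x : Int × Int) :
    pvRowA x = (PySem.List.pyGetD pvTable (PySem.Int.band x.2 0xFF) []).map (fun p => x.1 * 8 + p) := by
  obtain ⟨i, item⟩ := x
  rw [show (0xFF : Int) = 255 from rfl, pvBandMask]
  have h0 : 0 ≤ PySem.Int.mod item 256 := PySem.Int.mod_nonneg _ (by norm_num)
  have h1 : PySem.Int.mod item 256 < 256 := PySem.Int.mod_lt _ (by norm_num)
  set v := PySem.Int.mod item 256 with hv
  have hlt : v.toNat < 256 := by omega
  have hn : v = ((v.toNat : Nat) : Int) := by omega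
  have hget : PySem.List.pyGetD pvTable v [] = pvBits ((v.toNat : Nat) : Int) := by
    rw [hn]
    unfold pvTable
    rw [show ((256:Int)) = ((256:Nat):Int) from rfl]
    rw [PySem.List.pyGetD_map_pyRange _ 256 v.toNat _ hlt]
    exact pvFinRow ⟨v.toNat, hlt⟩
  rw [hget, pvRowA_map]
  have hb2 : pvBits item = pvBits ((v.toNat : Nat) : Int) := by
    conv_rhs => rw [← hn]
    rw [pvBits_mod item, ← hv]
  rw [hb2]

-- ===== VERDICT (by name: the statement is the Claim_ definition above) =====
theorem statusflags_from_bytes_spec : Claim_equal_statusflags_from_bytes := by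
  intro payload _
  unfold Spec_statusflags_from_bytes statusflags_from_bytes_alt
  rw [statusflags_eq_flatMap]
  exact List.flatMap_congr (fun x _ => pvRow_eq x)
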